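-- pv_equiv track=rewrite | github.com/Moulya-Reddy/Communication_Skills_Analyzer_AI_Tool | backend/analyzer.py | _analyze_salutation
-- ===== SOURCE A (Python) =====
-- def _analyze_salutation(transcript):
--     """Analyze salutation level"""
--     transcript_lower = transcript.lower()
--
--     # Excellent salutations
--     excellent_keywords = ['excited to introduce', 'feeling great', 'thrilled to share', 'honored to be']
--     for keyword in excellent_keywords:
--         if keyword in transcript_lower:
--             return 5
--
--     # Good salutations
--     good_keywords = ['good morning', 'good afternoon', 'good evening', 'good day', 'hello everyone']
--     for keyword in good_keywords:
--         if keyword in transcript_lower: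
--             return 4
--
--     # Normal salutations
--     normal_keywords = ['hi', 'hello', 'hey']
--     for keyword in normal_keywords:
--         if keyword in transcript_lower:
--             return 2
--
--     return 0
-- ===== SOURCE B (Python) =====
-- _EXCELLENT = ['excited to introduce', 'feeling great', 'thrilled to share', 'honored to be']
-- _GOOD = ['good morning', 'good afternoon', 'good evening', 'good day', 'hello everyone']
-- _NORMAL = ['hi', 'hello', 'hey']
--
--
-- def _tier_at(t, i):
--     """Score of the best keyword that starts exactly at position i of t."""
--     if any(t.startswith(k, i) for k in _EXCELLENT):
--         return 5
--     if any(t.startswith(k, i) for k in _GOOD):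
--         return 4
--     if any(t.startswith(k, i) for k in _NORMAL):
--         return 2
--     return 0
--
--
-- def _analyze_salutation(transcript):
--     """Analyze salutation level: scan the text left to right, scoring keywords
--     that start at each position, and keep a running maximum."""
--     t = transcript.lower()
--     best = 0
--     for i in range(len(t)):
--         best = max(best, _tier_at(t, i))
--     return best
-- ===== Notes on version B (the rewrite author's own statement) =====
-- stated objective: alternative
-- what changed: Replaces A's keyword-driven substring-membership tests with early returns by a position-driven single left-to-right scan over the text's suffixes (naive multi-pattern matching) that scores keywords starting at each position and keeps a running maximum.
import Mathlib
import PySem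

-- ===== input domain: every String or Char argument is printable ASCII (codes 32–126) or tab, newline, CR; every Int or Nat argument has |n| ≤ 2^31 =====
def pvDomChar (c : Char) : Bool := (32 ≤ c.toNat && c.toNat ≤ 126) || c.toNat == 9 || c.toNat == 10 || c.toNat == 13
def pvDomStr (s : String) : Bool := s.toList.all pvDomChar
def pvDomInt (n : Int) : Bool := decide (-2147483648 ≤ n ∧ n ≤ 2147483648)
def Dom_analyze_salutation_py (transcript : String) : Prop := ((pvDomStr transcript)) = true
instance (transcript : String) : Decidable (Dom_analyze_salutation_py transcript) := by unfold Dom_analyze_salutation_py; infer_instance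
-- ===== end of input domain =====

-- B replaces A's keyword-driven substring-membership tests (early return per tier) by a
-- position-driven left-to-right scan scoring keywords that start at each position, with a
-- running maximum (alternative decomposition, same asymptotic cost).
-- ===== PORT A =====
def analyze_salutation_py (transcript : String) : Int :=
  let transcript_lower := PySem.Str.lower transcript
  -- each 'for keyword in …: if keyword in …: return v' loop is the obvious List.any early-exit scan
  if (["excited to introduce", "feeling great", "thrilled to share", "honored to be"].any
        (fun keyword => PySem.Str.isIn keyword transcript_lower)) then 5
  else if (["good morning", "good afternoon", "good evening", "good day", "hello everyone"].any
        (fun keyword => PySem.Str.isIn keyword transcript_lower)) then 4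
  else if (["hi", "hello", "hey"].any
        (fun keyword => PySem.Str.isIn keyword transcript_lower)) then 2
  else 0

-- ===== PORT B =====
def pvExcellent : List (List Char) :=
  ["excited to introduce", "feeling great", "thrilled to share", "honored to be"].map String.toList
def pvGood : List (List Char) :=
  ["good morning", "good afternoon", "good evening", "good day", "hello everyone"].map String.toList
def pvNormal : List (List Char) := ["hi", "hello", "hey"].map String.toList

-- Source B's _tier_at(t, i); Python's t.startswith(k, i) for 0 ≤ i is exactly 'k <+: t.drop i'
def pvTierAt (t : List Char) (i : Nat) : Int :=
  if pvExcellent.any (fun k => PySem.Chars.startswith (t.drop i) k) then 5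
  else if pvGood.any (fun k => PySem.Chars.startswith (t.drop i) k) then 4
  else if pvNormal.any (fun k => PySem.Chars.startswith (t.drop i) k) then 2
  else 0

-- Source B's 'for i in range(len(t)): best = max(best, _tier_at(t, i))' loop
def analyze_salutation_py_alt (transcript : String) : Int :=
  let t := (PySem.Str.lower transcript).toList
  (List.range t.length).foldl (fun best i => max best (pvTierAt t i)) 0

-- ===== PRECONDITION & SPEC =====
def Spec_analyze_salutation_py (transcript : String) (out : Int) : Prop := out = analyze_salutation_py_alt transcript
instance (transcript : String) (out : Int) : Decidable (Spec_analyze_salutation_py transcript out) := by unfold Spec_analyze_salutation_py; infer_instance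

-- ===== CLAIM (what is proved, stated in full; the proofs are below) =====
def Claim_equal_analyze_salutation_py : Prop := ∀ (transcript : String), Dom_analyze_salutation_py transcript → Spec_analyze_salutation_py transcript (analyze_salutation_py transcript)

-- ===== LEMMAS AND PROOFS =====

-- score of the best keyword starting at the FRONT of a suffix: pvTierAt t i = pvHeadScore (t.drop i)
def pvHeadScore (s : List Char) : Int :=
  if pvExcellent.any (fun k => PySem.Chars.startswith s k) then 5
  else if pvGood.any (fun k => PySem.Chars.startswith s k) then 4
  else if pvNormal.any (fun k => PySem.Chars.startswith s k) then 2
  else 0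

-- B's loop re-expressed as structural recursion on the suffixes of t
def pvScan : List Char → Int → Int
  | [], best => best
  | c :: rest, best => pvScan rest (max best (pvHeadScore (c :: rest)))

-- A-side score of a (lowered) character list: the if-chain over substring membership
def pvSubScore (t : List Char) : Int :=
  if pvExcellent.any (fun k => PySem.Chars.isIn k t) then 5
  else if pvGood.any (fun k => PySem.Chars.isIn k t) then 4
  else if pvNormal.any (fun k => PySem.Chars.isIn k t) then 2
  else 0

theorem tierAt_eq_headScore (t : List Char) (i : Nat) :
    pvTierAt t i = pvHeadScore (t.drop i) := rfl

-- B's index fold over range(len t) is the suffix recursion pvScan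
theorem fold_eq_scan (t : List Char) : ∀ b : Int,
    (List.range t.length).foldl (fun best i => max best (pvTierAt t i)) b = pvScan t b := by
  induction t with
  | nil => intro b; rfl
  | cons c rest ih =>
      intro b
      rw [List.length_cons, List.range_succ_eq_map, List.foldl_cons, List.foldl_map]
      simp only [tierAt_eq_headScore, List.drop_succ_cons, List.drop_zero]
      exact ih (max b (pvHeadScore (c :: rest)))

theorem any_or_distrib {α : Type} (L : List α) (f g : α → Bool) :
    L.any (fun x => f x || g x) = (L.any f || L.any g) := by
  induction L with
  | nil => rfl
  | cons a l ih =>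
      cases hf : f a <;> cases hg : g a <;> simp [List.any_cons, hf, hg, ih]

theorem isIn_cons_eq (k : List Char) (c : Char) (rest : List Char) :
    PySem.Chars.isIn k (c :: rest)
      = (PySem.Chars.startswith (c :: rest) k || PySem.Chars.isIn k rest) := by
  rw [Bool.eq_iff_iff]
  simp only [Bool.or_eq_true, PySem.Chars.isIn_iff_infix, PySem.Chars.startswith_iff]
  exact List.infix_cons_iff

theorem anyIn_cons (L : List (List Char)) (c : Char) (rest : List Char) :
    L.any (fun k => PySem.Chars.isIn k (c :: rest))
      = (L.any (fun k => PySem.Chars.startswith (c :: rest) k)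
          || L.any (fun k => PySem.Chars.isIn k rest)) := by
  simp only [isIn_cons_eq, any_or_distrib]

theorem subScore_cons (c : Char) (rest : List Char) :
    pvSubScore (c :: rest) = max (pvHeadScore (c :: rest)) (pvSubScore rest) := by
  unfold pvSubScore pvHeadScore
  rw [anyIn_cons, anyIn_cons, anyIn_cons]
  generalize pvExcellent.any (fun k => PySem.Chars.startswith (c :: rest) k) = s5
  generalize pvGood.any (fun k => PySem.Chars.startswith (c :: rest) k) = s4
  generalize pvNormal.any (fun k => PySem.Chars.startswith (c :: rest) k) = s2
  generalize pvExcellent.any (fun k => PySem.Chars.isIn k rest) = a5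
  generalize pvGood.any (fun k => PySem.Chars.isIn k rest) = a4
  generalize pvNormal.any (fun k => PySem.Chars.isIn k rest) = a2
  cases s5 <;> cases s4 <;> cases s2 <;> cases a5 <;> cases a4 <;> cases a2 <;> decide

theorem subScore_nonneg (t : List Char) : 0 ≤ pvSubScore t := by
  unfold pvSubScore
  split_ifs <;> decide

theorem scan_eq (t : List Char) :
    ∀ b : Int, 0 ≤ b → pvScan t b = max b (pvSubScore t) := by
  induction t with
  | nil =>
      intro b hb
      have h : pvSubScore [] = 0 := by decide
      simp [pvScan, h]
      omega
  | cons c rest ih =>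
      intro b hb
      rw [pvScan, ih _ (le_trans hb (le_max_left _ _)), subScore_cons, max_assoc]

theorem key_lemma (s : String) :
    analyze_salutation_py s = analyze_salutation_py_alt s := by
  unfold analyze_salutation_py analyze_salutation_py_alt
  rw [fold_eq_scan, scan_eq _ _ le_rfl]
  have h0 := subScore_nonneg (PySem.Str.lower s).toList
  simp only [pvSubScore, pvExcellent, pvGood, pvNormal, List.map, List.any_cons,
    List.any_nil, PySem.Str.isIn_eq] at *
  split_ifs at * <;> simp_all

-- ===== VERDICT (by name: the statement is the Claim_ definition above) =====
theorem analyze_salutation_py_spec : Claim_equal_analyze_salutation_py := by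
  intro t _
  exact key_lemma t
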